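-- pv_equiv track=rewrite | github.com/Erwin-Veenhoven/Sudoku-Solver | Sudoku.py | get_next_possible_num
-- ===== SOURCE A (Python) =====
-- def get_next_possible_num(board, pos):
--     possible_nums = [1, 2, 3, 4, 5, 6, 7, 8, 9]
--
--     # Remove all numbers that are equal or lower to the current number
--     for i in range(board[pos[0]][pos[1]]):
--         possible_nums.remove(i + 1)
--
--     # Check columns
--     for col_ind in range(len(board[0])):
--         if board[pos[0]][col_ind] in possible_nums:
--             possible_nums.remove(board[pos[0]][col_ind])
--
--     # Check rows
--     for row_ind in range(len(board)):
--         if board[row_ind][pos[1]] in possible_nums: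
--             possible_nums.remove(board[row_ind][pos[1]])
--
--     # Check the squares
--     start_pos = (pos[0] - pos[0] % 3, pos[1] - pos[1] % 3)
--     for row_ind in range(3):
--         for col_ind in range(3):
--             if board[row_ind + start_pos[0]][col_ind + start_pos[1]] in possible_nums:
--                 possible_nums.remove(board[row_ind + start_pos[0]][col_ind + start_pos[1]])
--
--     # If there are no possible numbers return None
--     if len(possible_nums) == 0:
--         return None
--
--     # Return the number
--     return possible_nums[0]
-- ===== SOURCE B (Python) =====
-- def get_next_possible_num(board, pos):
--     # Loop interchange: no candidate list and no used-value collection is built.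
--     # For each candidate n ascending, test n directly against the row, the column
--     # and the 3x3 box with short-circuiting scans; return the first unused one.
--     r, c = pos
--     sr, sc = r - r % 3, c - c % 3
--
--     def used(n):
--         return (any(board[r][j] == n for j in range(len(board[0])))
--                 or any(board[i][c] == n for i in range(len(board)))
--                 or any(board[sr + i][sc + j] == n
--                        for i in range(3) for j in range(3)))
--
--     for n in range(max(board[r][c], 0) + 1, 10):
--         if not used(n):
--             return n
--     return None
-- ===== Notes on version B (the rewrite author's own statement) =====
-- stated objective: alternative
-- what changed: Interchanges the loops: A scans the board's row/column/box removing each seen value from a shrinking candidate list and returns its first survivor, while B never materialises a candidate or used collection at all - it iterates candidates ascending and tests each one directly against the row, column and box with short-circuiting any-scans, returning the first candidate found in none of them.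
import Mathlib
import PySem

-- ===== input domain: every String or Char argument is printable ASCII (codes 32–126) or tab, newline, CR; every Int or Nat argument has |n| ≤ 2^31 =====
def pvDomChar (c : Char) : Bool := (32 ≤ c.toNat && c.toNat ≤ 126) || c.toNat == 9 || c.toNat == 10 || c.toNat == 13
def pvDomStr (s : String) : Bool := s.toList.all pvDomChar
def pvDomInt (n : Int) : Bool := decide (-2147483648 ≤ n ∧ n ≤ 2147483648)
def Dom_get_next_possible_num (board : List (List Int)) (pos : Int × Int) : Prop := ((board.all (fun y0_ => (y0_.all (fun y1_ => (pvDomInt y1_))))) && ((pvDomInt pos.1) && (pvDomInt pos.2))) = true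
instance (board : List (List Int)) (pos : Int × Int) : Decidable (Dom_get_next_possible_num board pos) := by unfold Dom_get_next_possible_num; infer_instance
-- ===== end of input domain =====

-- B interchanges the loops: instead of A's scan-and-remove passes over a shrinking candidate
-- list, B iterates candidates ascending and probes each directly against row/column/box
-- (objective: alternative; equivalence of RETURN values on Pre_, where A returns normally).

-- ===== PORT A =====
-- A's repeated Python pattern 'if x in possible_nums: possible_nums.remove(x)' (one step of each check loop)
def pvRem (acc : List Int) (x : Int) : List Int :=
  if x ∈ acc then (PySem.List.remove? acc x).getD acc else acc

def get_next_possible_num (board : List (List Int)) (pos : Int × Int) : Option Int :=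
  let possible0 : List Int := [1, 2, 3, 4, 5, 6, 7, 8, 9]
  -- for i in range(board[pos[0]][pos[1]]): possible_nums.remove(i + 1)   (remove raises outside Pre_)
  let possible1 := (PySem.List.pyRange 0 (PySem.List.pyGetD (PySem.List.pyGetD board pos.1 []) pos.2 0) 1).foldl
    (fun acc i => (PySem.List.remove? acc (i + 1)).getD acc) possible0
  -- for col_ind in range(len(board[0])): if board[pos[0]][col_ind] in possible_nums: remove it
  let possible2 := (PySem.List.pyRange 0 ((PySem.List.pyGetD board 0 []).length : Int) 1).foldl
    (fun acc c => pvRem acc (PySem.List.pyGetD (PySem.List.pyGetD board pos.1 []) c 0)) possible1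
  -- for row_ind in range(len(board)): if board[row_ind][pos[1]] in possible_nums: remove it
  let possible3 := (PySem.List.pyRange 0 (board.length : Int) 1).foldl
    (fun acc r => pvRem acc (PySem.List.pyGetD (PySem.List.pyGetD board r []) pos.2 0)) possible2
  -- start_pos = (pos[0] - pos[0] % 3, pos[1] - pos[1] % 3); 3×3 square loop
  let s0 := pos.1 - PySem.Int.mod pos.1 3
  let s1 := pos.2 - PySem.Int.mod pos.2 3
  let possible4 := (PySem.List.pyRange 0 3 1).foldl
    (fun acc r => (PySem.List.pyRange 0 3 1).foldl
      (fun acc2 c => pvRem acc2 (PySem.List.pyGetD (PySem.List.pyGetD board (r + s0) []) (c + s1) 0)) acc) possible3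
  -- if len(possible_nums) == 0: return None ; return possible_nums[0]
  if possible4.length = 0 then none else PySem.List.pyGet? possible4 0

-- ===== PORT B =====
-- B's helper used(n): probe candidate n against row, column and 3×3 box (short-circuit ors)
def pvUsed (board : List (List Int)) (r c sr sc n : Int) : Bool :=
  ((PySem.List.pyRange 0 ((PySem.List.pyGetD board 0 []).length : Int) 1).any
      (fun j => PySem.List.pyGetD (PySem.List.pyGetD board r []) j 0 == n))
  || ((PySem.List.pyRange 0 (board.length : Int) 1).any
      (fun i => PySem.List.pyGetD (PySem.List.pyGetD board i []) c 0 == n))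
  || ((PySem.List.pyRange 0 3 1).any (fun i => (PySem.List.pyRange 0 3 1).any
      (fun j => PySem.List.pyGetD (PySem.List.pyGetD board (sr + i) []) (sc + j) 0 == n)))

def get_next_possible_num_alt (board : List (List Int)) (pos : Int × Int) : Option Int :=
  let r := pos.1
  let c := pos.2
  let sr := r - PySem.Int.mod r 3
  let sc := c - PySem.Int.mod c 3
  -- for n in range(max(board[r][c], 0) + 1, 10): if not used(n): return n ;; return None
  (PySem.List.pyRange (max (PySem.List.pyGetD (PySem.List.pyGetD board r []) c 0) 0 + 1) 10 1).find?
    (fun n => !pvUsed board r c sr sc n)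

-- ===== PRECONDITION & SPEC =====
-- Pre_ is exactly where the Python A returns: both cell indices of pos valid (Python negative
-- indexing allowed), current value ≤ 9 (else remove(10) raises ValueError), the current row at
-- least as long as board[0], column pos[1] valid in every row, and all nine 3×3-box accesses valid.
def Pre_get_next_possible_num (board : List (List Int)) (pos : Int × Int) : Prop :=
  PySem.Raise.InRange board.length pos.1 ∧
  PySem.Raise.InRange (PySem.List.pyGetD board pos.1 []).length pos.2 ∧
  PySem.List.pyGetD (PySem.List.pyGetD board pos.1 []) pos.2 0 ≤ 9 ∧
  (PySem.List.pyGetD board 0 []).length ≤ (PySem.List.pyGetD board pos.1 []).length ∧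
  (∀ r ∈ board, PySem.Raise.InRange r.length pos.2) ∧
  (∀ i ∈ PySem.List.pyRange 0 3 1,
     PySem.Raise.InRange board.length (i + (pos.1 - PySem.Int.mod pos.1 3)) ∧
     ∀ j ∈ PySem.List.pyRange 0 3 1,
       PySem.Raise.InRange (PySem.List.pyGetD board (i + (pos.1 - PySem.Int.mod pos.1 3)) []).length
         (j + (pos.2 - PySem.Int.mod pos.2 3)))
instance (board : List (List Int)) (pos : Int × Int) : Decidable (Pre_get_next_possible_num board pos) := by
  unfold Pre_get_next_possible_num; infer_instance

def pvWitness_get_next_possible_num : List (List Int) × (Int × Int) :=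
  ([[0, 1, 2], [3, 4, 5], [6, 7, 8]], (0, 0))

def Spec_get_next_possible_num (board : List (List Int)) (pos : Int × Int) (out : Option Int) : Prop := out = get_next_possible_num_alt board pos
instance (board : List (List Int)) (pos : Int × Int) (out : Option Int) : Decidable (Spec_get_next_possible_num board pos out) := by unfold Spec_get_next_possible_num; infer_instance

-- ===== CLAIM (what is proved, stated in full; the proofs are below) =====
def Claim_equal_get_next_possible_num : Prop := ∀ (board : List (List Int)) (pos : Int × Int), Dom_get_next_possible_num board pos → Pre_get_next_possible_num board pos → Spec_get_next_possible_num board pos (get_next_possible_num board pos)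

-- ===== LEMMAS AND PROOFS =====

-- A's conditional-remove loop over scan list S, on a duplicate-free candidate list, is a filter.
lemma foldl_pvRem_eq_filter (S : List Int) : ∀ L : List Int, L.Nodup →
    S.foldl pvRem L = L.filter (fun x => !S.contains x) := by
  induction S with
  | nil => intro L _; simp
  | cons s S ih =>
    intro L hL
    have hstep : pvRem L s = L.filter (· != s) := by
      unfold pvRem
      by_cases h : s ∈ L
      · rw [if_pos h, PySem.List.remove?_eq_some_erase L s h, Option.getD_some, hL.erase_eq_filter]
      · rw [if_neg h]
        refine (List.filter_eq_self.mpr ?_).symm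
        intro a ha
        simp only [bne_iff_ne, ne_eq]
        rintro rfl; exact h ha
    rw [List.foldl_cons, hstep, ih _ (hL.filter _), List.filter_filter]
    refine List.filter_congr ?_
    intro a _
    rw [Bool.eq_iff_iff]
    simp only [Bool.and_eq_true, Bool.not_eq_eq_eq_not, Bool.not_true, bne_iff_ne, ne_eq,
      List.contains_eq_mem, List.mem_cons]
    constructor
    · rintro ⟨h1, h2⟩; simp_all
    · intro hh; simp_all

-- a loop 'for c in R: pvRem with value f c' is a pvRem-fold over the scanned values
lemma foldl_pvRem_map (f : Int → Int) (R L : List Int) :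
    R.foldl (fun acc c => pvRem acc (f c)) L = (R.map f).foldl pvRem L := by
  rw [List.foldl_map]

-- the nested 3×3 loop is a pvRem-fold over the flattened scanned values
lemma foldl_pvRem_box (h : Int → Int → Int) (R R' L : List Int) :
    R.foldl (fun acc r => R'.foldl (fun a c => pvRem a (h r c)) acc) L
      = (R.flatMap (fun r => R'.map (h r))).foldl pvRem L := by
  rw [List.foldl_flatMap]
  simp only [List.foldl_map]

-- the first loop: removing 1..v from [1..9] leaves exactly range(max(v,0)+1, 10)
lemma loop1_eq (v : Int) (hv : v ≤ 9) :
    (PySem.List.pyRange 0 v 1).foldl (fun acc i => (PySem.List.remove? acc (i + 1)).getD acc)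
        [1, 2, 3, 4, 5, 6, 7, 8, 9]
      = PySem.List.pyRange (max v 0 + 1) 10 1 := by
  by_cases h : v ≤ 0
  · rw [PySem.List.pyRange_one_eq_nil h, max_eq_right h]
    decide
  · have h1 : 1 ≤ v := by omega
    interval_cases v <;> decide

-- a mapped scan list contains a iff some index's value equals a (B's per-candidate any-probe)
lemma contains_map_any (f : Int → Int) (R : List Int) (a : Int) :
    (R.map f).contains a = R.any (fun x => f x == a) := by
  rw [Bool.eq_iff_iff]
  simp only [List.contains_eq_mem, decide_eq_true_eq, List.mem_map, List.any_eq_true, beq_iff_eq]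

-- same for the flattened box scan vs B's nested any-probe
lemma contains_flatMap_any (g : Int → Int → Int) (R R' : List Int) (a : Int) :
    (R.flatMap (fun r => R'.map (g r))).contains a
      = R.any (fun i => R'.any (fun j => g i j == a)) := by
  rw [Bool.eq_iff_iff]
  simp only [List.contains_eq_mem, decide_eq_true_eq, List.mem_flatMap, List.mem_map,
    List.any_eq_true, beq_iff_eq]

-- A's final 'if len == 0 then None else first element' is head?
lemma guard_head (xs : List Int) :
    (if xs.length = 0 then none else PySem.List.pyGet? xs 0) = xs.head? := by
  cases xs <;> simp

-- ===== VERDICT (by name: the statement is the Claim_ definition above) =====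
theorem get_next_possible_num_spec : Claim_equal_get_next_possible_num := by
  intro board pos _ hpre
  unfold Spec_get_next_possible_num
  obtain ⟨_, _, hv, _⟩ := hpre
  show get_next_possible_num board pos = get_next_possible_num_alt board pos
  unfold get_next_possible_num get_next_possible_num_alt
  dsimp only
  rw [loop1_eq _ hv,
      foldl_pvRem_map (fun c => PySem.List.pyGetD (PySem.List.pyGetD board pos.1 []) c 0),
      foldl_pvRem_map (fun r => PySem.List.pyGetD (PySem.List.pyGetD board r []) pos.2 0),
      foldl_pvRem_box (fun r c => PySem.List.pyGetD (PySem.List.pyGetD board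
        (r + (pos.1 - PySem.Int.mod pos.1 3)) []) (c + (pos.2 - PySem.Int.mod pos.2 3)) 0),
      foldl_pvRem_eq_filter _ _ (PySem.List.nodup_pyRange_one _ _),
      foldl_pvRem_eq_filter _ _ ((PySem.List.nodup_pyRange_one _ _).filter _),
      foldl_pvRem_eq_filter _ _ (((PySem.List.nodup_pyRange_one _ _).filter _).filter _),
      guard_head, List.filter_filter, List.filter_filter, ← List.head?_filter]
  refine congrArg _ (List.filter_congr ?_)
  intro a _
  rw [contains_flatMap_any, contains_map_any, contains_map_any, Bool.eq_iff_iff]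
  unfold pvUsed
  simp only [Bool.and_eq_true, Bool.not_eq_eq_eq_not, Bool.not_true, Int.add_comm,
    Bool.or_eq_false_iff]
  tauto
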